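-- pv_equiv track=rewrite | github.com/Sutekh-VtES/sutekh-mirror | sutekh/sutekh/base/gui/plugins/BaseOpeningDraw.py | fill_string
-- ===== SOURCE A (Python) =====
-- def fill_string(dGroups, dInfo, dToCheck):
--     """Construct a string to display for type info"""
--     sResult = ''
--     aSortedList = sorted(dInfo.items(), key=lambda x: (x[1], x[0]),
--                          reverse=True)
--     for sGroup, iGrpNum in dGroups.items():
--         sResult += u'%d \u00D7 %s\n' % (iGrpNum, sGroup)
--         for sCardName, iNum in aSortedList:
--             if sCardName in dToCheck[sGroup]:
--                 sResult += u'<i>\t%d \u00D7 %s</i>\n' % (iNum, sCardName)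
--     return sResult
-- ===== SOURCE B (Python) =====
-- def fill_string(dGroups, dInfo, dToCheck):
--     """Construct a string to display for type info"""
--     aSortedList = sorted(dInfo.items(), key=lambda x: (x[1], x[0]),
--                          reverse=True)
--     # one pass over the sorted cards routes each formatted line into a per-group buffer
--     buffers = {sGrp: [] for sGrp in dGroups}
--     for sName, iCnt in aSortedList:
--         for sGrp in dGroups:
--             if sName in dToCheck[sGrp]:
--                 buffers[sGrp].append(u'<i>\t%d \u00D7 %s</i>\n' % (iCnt, sName))
--     # assemble: each group's header followed by its buffered lines, joined once
--     aParts = []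
--     for sGrp, iGrpNum in dGroups.items():
--         aParts.append(u'%d \u00D7 %s\n' % (iGrpNum, sGrp))
--         aParts.extend(buffers[sGrp])
--     return u''.join(aParts)
-- ===== Notes on version B (the rewrite author's own statement) =====
-- stated objective: alternative
-- what changed: Inverts the loop nesting: one pass over the sorted card list routes each formatted line into a per-group buffer dict, and the result is assembled group by group by joining a parts list instead of repeated string concatenation inside a doubly nested loop.
import Mathlib
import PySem

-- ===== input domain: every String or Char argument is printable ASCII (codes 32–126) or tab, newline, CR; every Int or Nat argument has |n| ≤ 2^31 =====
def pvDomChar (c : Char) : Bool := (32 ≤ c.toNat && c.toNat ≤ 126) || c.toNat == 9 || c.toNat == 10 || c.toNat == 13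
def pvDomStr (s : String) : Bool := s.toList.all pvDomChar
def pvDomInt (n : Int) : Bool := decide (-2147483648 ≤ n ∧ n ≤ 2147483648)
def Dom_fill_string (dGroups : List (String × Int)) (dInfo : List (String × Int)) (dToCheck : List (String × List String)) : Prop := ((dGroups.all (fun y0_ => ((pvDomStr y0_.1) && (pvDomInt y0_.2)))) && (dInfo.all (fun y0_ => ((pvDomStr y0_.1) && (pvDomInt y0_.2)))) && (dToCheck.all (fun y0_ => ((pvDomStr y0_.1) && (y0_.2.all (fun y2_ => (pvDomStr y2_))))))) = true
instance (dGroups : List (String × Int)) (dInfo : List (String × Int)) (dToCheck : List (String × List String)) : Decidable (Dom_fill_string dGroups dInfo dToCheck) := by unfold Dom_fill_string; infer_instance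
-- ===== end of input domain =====

-- ===== PORT A =====
-- B differs from A by a different decomposition (inverted loop nesting, buffers, join); return value only, no mutation.
-- shared formatting helpers (both Pythons build the same literal pieces)
def pvHeader (p : String × Int) : String := PySem.Int.toStr p.2 ++ " × " ++ p.1 ++ "\n"
def pvLine (c : String × Int) : String := "<i>\t" ++ PySem.Int.toStr c.2 ++ " × " ++ c.1 ++ "</i>\n"
-- Python's 'sCardName in dToCheck[sGroup]'; under Pre_ the lookup never misses, so getD [] is exact
def pvMemb (dToCheck : List (String × List String)) (g c : String) : Bool :=
  ((dToCheck.lookup g).getD []).contains c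

def fill_string (dGroups : List (String × Int)) (dInfo : List (String × Int)) (dToCheck : List (String × List String)) : String :=
  let aSortedList := PySem.List.sorted2 dInfo (fun x => x.2) (fun x => x.1) true
  dGroups.foldl (fun sResult p =>
    aSortedList.foldl (fun s c =>
      if pvMemb dToCheck p.1 c.1 then s ++ pvLine c else s)
      (sResult ++ pvHeader p)) ""

-- ===== PORT B =====
def fill_string_alt (dGroups : List (String × Int)) (dInfo : List (String × Int)) (dToCheck : List (String × List String)) : String :=
  let aSortedList := PySem.List.sorted2 dInfo (fun x => x.2) (fun x => x.1) true
  let buffers : PySem.Dict String (List String) :=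
    dGroups.foldl (fun d p => d.insert p.1 []) PySem.Dict.empty
  let buffers := aSortedList.foldl (fun d c =>
    dGroups.foldl (fun d p =>
      if pvMemb dToCheck p.1 c.1 then d.modify p.1 [] (fun l => l ++ [pvLine c]) else d) d)
    buffers
  let aParts := dGroups.foldl (fun acc p => (acc ++ [pvHeader p]) ++ buffers.getD p.1 []) []
  String.join aParts

-- ===== PRECONDITION & SPEC =====
-- Pre_ excludes (i) inputs where Python raises KeyError: some group of dGroups missing from dToCheck while dInfo
-- is non-empty (the lookup runs once per card), and (ii) duplicate keys in dGroups, which a Python dict cannot carry.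
def Pre_fill_string (dGroups : List (String × Int)) (dInfo : List (String × Int)) (dToCheck : List (String × List String)) : Prop :=
  (dInfo = [] ∨ ∀ p ∈ dGroups, (dToCheck.lookup p.1).isSome) ∧ (dGroups.map Prod.fst).Nodup
instance (dGroups : List (String × Int)) (dInfo : List (String × Int)) (dToCheck : List (String × List String)) : Decidable (Pre_fill_string dGroups dInfo dToCheck) := by unfold Pre_fill_string; infer_instance
def pvWitness_fill_string : (List (String × Int)) × (List (String × Int)) × (List (String × List String)) :=
  ([("crypt", 3), ("lib", 2)], [("Aabbt", 2), ("Zip", 1)], [("crypt", ["Aabbt"]), ("lib", ["Zip", "Aabbt"])])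

def Spec_fill_string (dGroups : List (String × Int)) (dInfo : List (String × Int)) (dToCheck : List (String × List String)) (out : String) : Prop := out = fill_string_alt dGroups dInfo dToCheck
instance (dGroups : List (String × Int)) (dInfo : List (String × Int)) (dToCheck : List (String × List String)) (out : String) : Decidable (Spec_fill_string dGroups dInfo dToCheck out) := by unfold Spec_fill_string; infer_instance

-- ===== CLAIM (what is proved, stated in full; the proofs are below) =====
def Claim_equal_fill_string : Prop := ∀ (dGroups : List (String × Int)) (dInfo : List (String × Int)) (dToCheck : List (String × List String)), Dom_fill_string dGroups dInfo dToCheck → Pre_fill_string dGroups dInfo dToCheck → Spec_fill_string dGroups dInfo dToCheck (fill_string dGroups dInfo dToCheck)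

-- ===== LEMMAS AND PROOFS =====
-- the per-group block of lines, in sorted order
def pvLines (dToCheck : List (String × List String)) (srt : List (String × Int)) (g : String) : List String :=
  (srt.filter (fun c => pvMemb dToCheck g c.1)).map pvLine

-- folding ++ from an accumulator = accumulator ++ join
theorem joinAcc : ∀ (l : List String) (s : String),
    l.foldl (fun r x => r ++ x) s = s ++ String.join l
  | [], s => by simp [String.join]
  | x :: t, s => by
      rw [List.foldl_cons, joinAcc t (s ++ x),
          show String.join (x :: t) = List.foldl (fun r x => r ++ x) (("" : String) ++ x) t from rfl,
          String.empty_append, joinAcc t x, String.append_assoc]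

theorem join_cons (x : String) (t : List String) : String.join (x :: t) = x ++ String.join t := by
  rw [show String.join (x :: t) = List.foldl (fun r x => r ++ x) (("" : String) ++ x) t from rfl,
      String.empty_append, joinAcc t x]

theorem join_append : ∀ (a b : List String), String.join (a ++ b) = String.join a ++ String.join b
  | [], b => by simp [String.join]
  | x :: t, b => by
      rw [List.cons_append, join_cons, join_append t b, join_cons, String.append_assoc]

-- A's inner loop appends exactly the pvLines block
theorem innerA (dToCheck : List (String × List String)) (g : String) :
    ∀ (l : List (String × Int)) (s : String),
      l.foldl (fun s c => if pvMemb dToCheck g c.1 then s ++ pvLine c else s) s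
        = s ++ String.join (pvLines dToCheck l g)
  | [], s => by simp [pvLines, String.join]
  | c :: t, s => by
      by_cases h : pvMemb dToCheck g c.1 = true
      · rw [List.foldl_cons, if_pos h, innerA dToCheck g t (s ++ pvLine c)]
        simp [pvLines, h, join_cons, String.append_assoc]
      · rw [List.foldl_cons, if_neg (by simp [h]), innerA dToCheck g t s]
        simp [pvLines, h]

-- A's outer loop, characterised
theorem outerA (dToCheck : List (String × List String)) (srt : List (String × Int)) :
    ∀ (gs : List (String × Int)) (s : String),
      gs.foldl (fun sResult p =>
          srt.foldl (fun s c => if pvMemb dToCheck p.1 c.1 then s ++ pvLine c else s)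
            (sResult ++ pvHeader p)) s
        = s ++ String.join (gs.flatMap (fun p => pvHeader p :: pvLines dToCheck srt p.1))
  | [], s => by simp [String.join]
  | p :: t, s => by
      rw [List.foldl_cons, outerA dToCheck srt t _, innerA, List.flatMap_cons, List.cons_append,
          join_cons, join_append]
      simp [String.append_assoc]

-- B's init: every buffer reads as []
theorem initB (g : String) :
    ∀ (gs : List (String × Int)) (d : PySem.Dict String (List String)),
      (∀ k, d.getD k ([] : List String) = []) →
      (gs.foldl (fun d p => d.insert p.1 ([] : List String)) d).getD g [] = [] := by
  intro gs
  induction gs with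
  | nil => intro d h; exact h g
  | cons p t ih =>
      intro d h
      exact ih _ (fun k => by rw [PySem.Dict.getD_insert]; split <;> simp [h])

-- B's per-card step, with nodup group keys
theorem stepB (dToCheck : List (String × List String)) (c : String × Int) (g : String) :
    ∀ (gs : List (String × Int)), (gs.map Prod.fst).Nodup →
      ∀ (d : PySem.Dict String (List String)),
      (gs.foldl (fun d p =>
          if pvMemb dToCheck p.1 c.1 then d.modify p.1 [] (fun l => l ++ [pvLine c]) else d) d).getD g []
        = if g ∈ gs.map Prod.fst ∧ pvMemb dToCheck g c.1 then d.getD g [] ++ [pvLine c] else d.getD g [] := by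
  intro gs
  induction gs with
  | nil => intro _ d; simp
  | cons p t ih =>
      intro hnd d
      rw [List.map_cons] at hnd
      obtain ⟨h1, h2⟩ := List.nodup_cons.mp hnd
      rw [List.foldl_cons, ih h2, List.map_cons]
      by_cases hg : g = p.1
      · rw [hg]
        by_cases hm : pvMemb dToCheck p.1 c.1 = true <;>
          simp [h1, hm, List.mem_cons]
      · have hmem : (g ∈ p.1 :: List.map Prod.fst t) ↔ g ∈ List.map Prod.fst t := by
          rw [List.mem_cons]; exact or_iff_right hg
        by_cases hm : pvMemb dToCheck p.1 c.1 = true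
        · rw [if_pos hm, PySem.Dict.getD_modify, if_neg hg]
          exact if_congr (and_congr_left' hmem.symm) rfl rfl
        · rw [if_neg hm]
          exact if_congr (and_congr_left' hmem.symm) rfl rfl

-- B's card loop accumulates pvLines into each group's buffer
theorem cardsB (dToCheck : List (String × List String)) (gs : List (String × Int))
    (hnd : (gs.map Prod.fst).Nodup) (g : String) (hg : g ∈ gs.map Prod.fst) :
    ∀ (l : List (String × Int)) (d : PySem.Dict String (List String)),
      (l.foldl (fun d c =>
          gs.foldl (fun d p =>
            if pvMemb dToCheck p.1 c.1 then d.modify p.1 [] (fun l => l ++ [pvLine c]) else d) d) d).getD g []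
        = d.getD g [] ++ pvLines dToCheck l g := by
  intro l
  induction l with
  | nil => intro d; simp [pvLines]
  | cons c t ih =>
      intro d
      rw [List.foldl_cons, ih, stepB dToCheck c g gs hnd d]
      by_cases hm : pvMemb dToCheck g c.1 = true
      · simp [pvLines, hg, hm]
      · simp [pvLines, hm]

-- B's parts loop flattens to the same shape as A
theorem partsB (f : String → List String) :
    ∀ (gs : List (String × Int)) (acc : List String),
      gs.foldl (fun acc p => (acc ++ [pvHeader p]) ++ f p.1) acc
        = acc ++ gs.flatMap (fun p => pvHeader p :: f p.1) := by
  intro gs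
  induction gs with
  | nil => simp
  | cons p t ih =>
      intro acc
      rw [List.foldl_cons, ih, List.flatMap_cons]
      simp [List.append_assoc]

theorem flatMap_congr_groups (dToCheck : List (String × List String)) (srt : List (String × Int))
    (buf : String → List String) :
    ∀ (gs : List (String × Int)), (∀ p ∈ gs, buf p.1 = pvLines dToCheck srt p.1) →
      gs.flatMap (fun p => pvHeader p :: buf p.1)
        = gs.flatMap (fun p => pvHeader p :: pvLines dToCheck srt p.1) := by
  intro gs
  induction gs with
  | nil => simp
  | cons p t ih =>
      intro h
      simp only [List.flatMap_cons]
      rw [h p (List.mem_cons_self), ih (fun q hq => h q (List.mem_cons_of_mem _ hq))]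

-- ===== VERDICT (by name: the statement is the Claim_ definition above) =====
theorem fill_string_spec : Claim_equal_fill_string := by
  intro dGroups dInfo dToCheck _ hpre
  unfold Spec_fill_string fill_string fill_string_alt
  simp only []
  set srt := PySem.List.sorted2 dInfo (fun x => x.2) (fun x => x.1) true with hs
  set B := srt.foldl (fun d c =>
      dGroups.foldl (fun d p =>
        if pvMemb dToCheck p.1 c.1 then d.modify p.1 [] (fun l => l ++ [pvLine c]) else d) d)
    (dGroups.foldl (fun d p => d.insert p.1 ([] : List String)) PySem.Dict.empty) with hB
  have hbuf : ∀ p ∈ dGroups, B.getD p.1 ([] : List String) = pvLines dToCheck srt p.1 := by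
    intro p hp
    rw [hB, cardsB dToCheck dGroups hpre.2 p.1 (List.mem_map_of_mem hp),
        initB p.1 dGroups PySem.Dict.empty (fun k => by simp [PySem.Dict.getD_empty])]
    simp
  rw [outerA, partsB (fun g => B.getD g ([] : List String)) dGroups [],
      flatMap_congr_groups dToCheck srt (fun g => B.getD g ([] : List String)) dGroups hbuf]
  simp
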